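-- pv_equiv track=rewrite | github.com/CarolineOlive/JogoDoNIM | jogo_nim.py | computador_escolhe_jogada
-- ===== SOURCE A (Python) =====
-- def computador_escolhe_jogada(n,m):
--     i = m #inicio
--     if n >= m:
--         while (n - i) % (m + 1) != 0:
--             i = i - 1 #número de peças a serem retiradas
--             if i == 0:
--                 break
--         p = n - i #peças
--         if p == n:
--             n = n - m
--             r = m
--         else:
--             n = p
--             r = i
--     else:
--         r = n
--     return r #número de peças a serem retiradas
-- ===== SOURCE B (Python) =====
-- def computador_escolhe_jogada(n, m):
--     if n < m:
--         return n
--     r = n % (m + 1)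
--     return r if r != 0 else m
-- ===== Notes on version B (the rewrite author's own statement) =====
-- stated objective: faster
-- what changed: Replaces A's O(m) downward search for the largest i <= m with (n-i) % (m+1) == 0 by the closed-form residue r = n % (m+1) (or m when r = 0), computed in O(1).
-- outside the precondition, e.g. on computador_escolhe_jogada(0, -5): A returns -8, B returns -5; on computador_escolhe_jogada(0, -1): A raises ZeroDivisionError, B raises ZeroDivisionError
import Mathlib
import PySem

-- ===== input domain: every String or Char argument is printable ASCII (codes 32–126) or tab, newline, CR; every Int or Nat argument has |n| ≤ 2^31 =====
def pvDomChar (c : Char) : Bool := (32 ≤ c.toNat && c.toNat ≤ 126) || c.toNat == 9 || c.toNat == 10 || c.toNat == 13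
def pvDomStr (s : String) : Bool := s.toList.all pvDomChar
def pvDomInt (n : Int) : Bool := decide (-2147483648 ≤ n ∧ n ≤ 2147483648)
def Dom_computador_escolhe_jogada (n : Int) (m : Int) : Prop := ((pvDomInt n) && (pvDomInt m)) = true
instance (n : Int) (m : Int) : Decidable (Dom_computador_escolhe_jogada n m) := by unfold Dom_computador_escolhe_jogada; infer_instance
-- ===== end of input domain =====

-- B replaces A's O(m) downward search by the O(1) closed form n % (m+1) (or m when that is 0);
-- equality is proved on Pre_ (n < m, or m ≥ 0), which excludes negative m with n ≥ m.

-- ===== PORT A =====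
-- A's while-loop: i starts at m and is decremented while (n - i) % (m + 1) ≠ 0, breaking when i
-- reaches 0.  The counter is modeled as a Nat (exact for m ≥ 0; Pre_ excludes m < 0 with n ≥ m,
-- where Python would crash (m = -1) or drive i below zero).
def pvLoopA (n m : Int) : Nat → Int
  | 0 => 0
  | k + 1 =>
    if PySem.Int.mod (n - ((k : Int) + 1)) (m + 1) ≠ 0 then pvLoopA n m k
    else ((k : Int) + 1)

def computador_escolhe_jogada (n : Int) (m : Int) : Int :=
  if n ≥ m then
    let i := pvLoopA n m m.toNat
    let p := n - i
    if p = n then m else i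
  else n

-- ===== PORT B =====
def computador_escolhe_jogada_alt (n : Int) (m : Int) : Int :=
  if n < m then n
  else
    let r := PySem.Int.mod n (m + 1)
    if r ≠ 0 then r else m

-- ===== PRECONDITION & SPEC =====
-- Pre_ excludes negative m with n ≥ m: there A raises ZeroDivisionError (m = -1, as does B) or,
-- for m < -1, its loop drives i below zero with a negative modulus, an accident of the
-- implementation outside the game's domain (m is the maximum number of pieces per move).
def Pre_computador_escolhe_jogada (n : Int) (m : Int) : Prop := n < m ∨ 0 ≤ m
instance (n : Int) (m : Int) : Decidable (Pre_computador_escolhe_jogada n m) := by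
  unfold Pre_computador_escolhe_jogada; infer_instance

def pvWitness_computador_escolhe_jogada : Int × Int := (10, 3)

def Spec_computador_escolhe_jogada (n : Int) (m : Int) (out : Int) : Prop :=
  out = computador_escolhe_jogada_alt n m
instance (n : Int) (m : Int) (out : Int) : Decidable (Spec_computador_escolhe_jogada n m out) := by
  unfold Spec_computador_escolhe_jogada; infer_instance

-- ===== CLAIM (what is proved, stated in full; the proofs are below) =====
def Claim_equal_computador_escolhe_jogada : Prop :=
  ∀ (n : Int) (m : Int), Dom_computador_escolhe_jogada n m →
    Pre_computador_escolhe_jogada n m →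
    Spec_computador_escolhe_jogada n m (computador_escolhe_jogada n m)

-- ===== LEMMAS AND PROOFS =====

-- The loop's exit test hits exactly at the residue of n modulo m+1.
lemma pvLoopA_cond_iff (n m : Int) (hm : 0 ≤ m) (k : Nat) (hkm : (k : Int) + 1 ≤ m) :
    PySem.Int.mod (n - ((k : Int) + 1)) (m + 1) = 0 ↔ n % (m + 1) = (k : Int) + 1 := by
  have hd : (0 : Int) < m + 1 := by omega
  rw [PySem.Int.mod_eq_emod_of_pos hd]
  have hr0 : 0 ≤ n % (m + 1) := Int.emod_nonneg n (by omega)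
  have hrlt : n % (m + 1) < m + 1 := Int.emod_lt_of_pos n hd
  constructor
  · intro hz
    have hdvd : (m + 1) ∣ (n - ((k : Int) + 1)) := Int.dvd_of_emod_eq_zero hz
    have hdvd' : (m + 1) ∣ (n % (m + 1) - ((k : Int) + 1)) := by
      have heq : n % (m + 1) - ((k : Int) + 1)
          = (n - ((k : Int) + 1)) - (m + 1) * (n / (m + 1)) := by
        rw [Int.emod_def]; ring
      rw [heq]
      exact dvd_sub hdvd (Dvd.intro _ rfl)
    have hzero : n % (m + 1) - ((k : Int) + 1) = 0 :=
      Int.eq_zero_of_abs_lt_dvd hdvd' (by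
        rw [abs_lt]
        constructor <;> omega)
    omega
  · intro he
    have heq : n - ((k : Int) + 1) = (m + 1) * (n / (m + 1)) := by
      rw [← he, Int.emod_def]; ring
    rw [heq, Int.mul_emod_right]

-- The loop returns the residue n % (m+1) once the counter has reached it from above.
lemma pvLoopA_eq_mod (n m : Int) (hm : 0 ≤ m) (k : Nat)
    (hk : n % (m + 1) ≤ (k : Int)) (hkm : (k : Int) ≤ m) :
    pvLoopA n m k = n % (m + 1) := by
  have hd : (0 : Int) < m + 1 := by omega
  have hr0 : 0 ≤ n % (m + 1) := Int.emod_nonneg n (by omega)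
  induction k with
  | zero => simp only [pvLoopA]; omega
  | succ k ih =>
    have hcond := pvLoopA_cond_iff n m hm k (by push_cast at hkm ⊢; omega)
    by_cases hhit : n % (m + 1) = (k : Int) + 1
    · have hz : PySem.Int.mod (n - ((k : Int) + 1)) (m + 1) = 0 := hcond.mpr hhit
      simp only [pvLoopA, push_cast, ne_eq, hz, not_true_eq_false, if_false]
      omega
    · have hnz : PySem.Int.mod (n - ((k : Int) + 1)) (m + 1) ≠ 0 := fun hz => hhit (hcond.mp hz)
      simp only [pvLoopA, ne_eq, hnz, not_false_eq_true, if_true]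
      exact ih (by push_cast at hk; omega) (by push_cast at hkm; omega)

-- ===== VERDICT (by name: the statement is the Claim_ definition above) =====
theorem computador_escolhe_jogada_spec : Claim_equal_computador_escolhe_jogada := by
  intro n m _ hpre
  unfold Spec_computador_escolhe_jogada computador_escolhe_jogada computador_escolhe_jogada_alt
  by_cases hge : n ≥ m
  · have hm : 0 ≤ m := by rcases hpre with h | h <;> omega
    have hd : (0 : Int) < m + 1 := by omega
    have hr0 : 0 ≤ n % (m + 1) := Int.emod_nonneg n (by omega)
    have hrlt : n % (m + 1) < m + 1 := Int.emod_lt_of_pos n hd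
    have htoNat : ((m.toNat : Int)) = m := Int.toNat_of_nonneg hm
    have hloop : pvLoopA n m m.toNat = n % (m + 1) :=
      pvLoopA_eq_mod n m hm m.toNat (by omega) (by omega)
    rw [if_pos hge, if_neg (show ¬ n < m by omega)]
    simp only [hloop, PySem.Int.mod_eq_emod_of_pos hd]
    by_cases hz : n % (m + 1) = 0
    · rw [hz]; simp
    · rw [if_neg (show ¬ (n - n % (m + 1) = n) from fun h => hz (by omega)), if_pos hz]
  · rw [if_neg hge, if_pos (show n < m by omega)]
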